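-- pv_equiv track=rewrite | github.com/shambhavi-22104056/eval | q1.py | transform
-- ===== SOURCE A (Python) =====
-- def transform(s,n):
--     transformed = ""
--     for i in range(len(s)):
--         if i < n :
--             transformed+=s[i].lower()
--         else:
--             transformed+=s[i].upper()
--     return transformed
-- ===== SOURCE B (Python) =====
-- def transform(s, n):
--     k = max(n, 0)
--     return s[:k].lower() + s[k:].upper()
-- ===== Notes on version B (the rewrite author's own statement) =====
-- stated objective: simpler
-- what changed: Replaces the per-character index loop that builds the string char by char with one clamped split point k = max(n, 0) and two bulk slice transformations s[:k].lower() + s[k:].upper().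
import Mathlib
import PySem

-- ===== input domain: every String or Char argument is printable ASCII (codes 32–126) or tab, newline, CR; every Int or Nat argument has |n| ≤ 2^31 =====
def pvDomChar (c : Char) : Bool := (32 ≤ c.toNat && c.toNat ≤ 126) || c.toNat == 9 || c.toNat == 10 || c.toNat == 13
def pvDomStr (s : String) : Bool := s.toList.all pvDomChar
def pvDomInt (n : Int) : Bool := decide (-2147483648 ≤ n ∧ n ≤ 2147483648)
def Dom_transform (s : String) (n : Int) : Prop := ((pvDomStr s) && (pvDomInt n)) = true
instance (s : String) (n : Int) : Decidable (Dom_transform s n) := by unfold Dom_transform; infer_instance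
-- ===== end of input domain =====

-- B replaces A's per-character index loop with one clamped split point k = max(n,0)
-- and two bulk slice transformations (simpler decomposition, same result).

-- ===== PORT A =====
def transform (s : String) (n : Int) : String :=
  String.ofList ((PySem.List.pyRange 0 (s.toList.length : Int) 1).foldl
    (fun acc i =>
      acc ++ (if i < n then [PySem.Chars.lowerChar (PySem.List.pyGetD s.toList i ' ')]
              else [PySem.Chars.upperChar (PySem.List.pyGetD s.toList i ' ')])) [])

-- ===== PORT B =====
def transform_alt (s : String) (n : Int) : String :=
  let k : Int := max n 0
  String.ofList (PySem.Chars.lower (PySem.List.slice s.toList none (some k)) ++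
             PySem.Chars.upper (PySem.List.slice s.toList (some k) none))

-- ===== PRECONDITION & SPEC =====
def Spec_transform (s : String) (n : Int) (out : String) : Prop := out = transform_alt s n
instance (s : String) (n : Int) (out : String) : Decidable (Spec_transform s n out) := by unfold Spec_transform; infer_instance

-- ===== CLAIM (what is proved, stated in full; the proofs are below) =====
def Claim_equal_transform : Prop := ∀ (s : String) (n : Int), Dom_transform s n → Spec_transform s n (transform s n)

-- ===== LEMMAS AND PROOFS =====

lemma key_lemma (cs : List Char) (n : Int) :
    (List.range cs.length).map
      (fun (i : Nat) => if (i : Int) < n then PySem.Chars.lowerChar (cs.getD i ' ')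
                else PySem.Chars.upperChar (cs.getD i ' '))
    = PySem.Chars.lower (cs.take (max n 0).toNat) ++ PySem.Chars.upper (cs.drop (max n 0).toNat) := by
  induction cs generalizing n with
  | nil => simp [PySem.Chars.lower, PySem.Chars.upper]
  | cons c cs ih =>
    rw [List.length_cons, List.range_succ_eq_map, List.map_cons, List.map_map]
    have htail : ((List.range cs.length).map
        ((fun (i : Nat) => if (i : Int) < n then PySem.Chars.lowerChar ((c :: cs).getD i ' ')
                   else PySem.Chars.upperChar ((c :: cs).getD i ' ')) ∘ Nat.succ))
        = (List.range cs.length).map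
          (fun (i : Nat) => if (i : Int) < n - 1 then PySem.Chars.lowerChar (cs.getD i ' ')
                    else PySem.Chars.upperChar (cs.getD i ' ')) := by
      apply List.map_congr_left
      intro i _
      have hiff : ((Nat.succ i : Nat) : Int) < n ↔ (i : Int) < n - 1 := by push_cast; omega
      simp only [Function.comp, List.getD_cons_succ]
      by_cases h : (i : Int) < n - 1
      · rw [if_pos h, if_pos (hiff.mpr h)]
      · rw [if_neg h, if_neg (fun hc => h (hiff.mp hc))]
    rw [htail, ih (n - 1)]
    by_cases hn : 0 < n
    · have h1 : (max n 0).toNat = (max (n - 1) 0).toNat + 1 := by omega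
      rw [if_pos (by exact_mod_cast hn), h1, List.take_succ_cons, List.drop_succ_cons]
      simp [PySem.Chars.lower]
    · have h0 : (max n 0).toNat = 0 := by omega
      have h0' : (max (n - 1) 0).toNat = 0 := by omega
      rw [if_neg (by exact_mod_cast hn), h0, h0', List.take_zero, List.drop_zero,
        List.take_zero, List.drop_zero]
      simp [PySem.Chars.lower, PySem.Chars.upper]

-- ===== VERDICT (by name: the statement is the Claim_ definition above) =====
theorem transform_spec : Claim_equal_transform := by
  intro s n _
  unfold Spec_transform transform transform_alt
  congr 1
  have hif : ∀ (i : Int),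
      (if i < n then [PySem.Chars.lowerChar (PySem.List.pyGetD s.toList i ' ')]
       else [PySem.Chars.upperChar (PySem.List.pyGetD s.toList i ' ')])
      = [if i < n then PySem.Chars.lowerChar (PySem.List.pyGetD s.toList i ' ')
         else PySem.Chars.upperChar (PySem.List.pyGetD s.toList i ' ')] := by
    intro i; by_cases h : i < n <;> simp [h]
  simp only [hif]
  have hb : (0 : Int) ≤ max n 0 := le_max_right n 0
  rw [PySem.List.foldl_append_singleton_eq_map, PySem.List.pyRange_zero_natCast,
    List.map_map, PySem.List.slice_to s.toList hb, PySem.List.slice_from s.toList hb]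
  rw [← key_lemma s.toList n]
  apply List.map_congr_left
  intro i _
  simp [Function.comp, PySem.List.pyGetD_natCast]
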